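-- pv_equiv track=rewrite | github.com/CRPR-CSCI7000/crpr-mcp | src/skills/registry.py | _normalize_block_text
-- ===== SOURCE A (Python) =====
-- def _normalize_block_text(lines: list[str]) -> str:
--     start = 0
--     end = len(lines)
--
--     while start < end and not lines[start].strip():
--         start += 1
--     while end > start and not lines[end - 1].strip():
--         end -= 1
--
--     return "\n".join(lines[start:end])
-- ===== SOURCE B (Python) =====
-- def _normalize_block_text(lines: list[str]) -> str:
--     idxs = [i for i, line in enumerate(lines) if line.strip()]
--     if not idxs:
--         return ""
--     return "\n".join(lines[idxs[0]:idxs[-1] + 1])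
-- ===== Notes on version B (the rewrite author's own statement) =====
-- stated objective: alternative
-- what changed: Replaces the two early-stopping boundary scans (forward and backward while loops mutating start/end) by a single enumerate pass that builds the list of non-blank indices, then slices from the first to the last collected index.
import Mathlib
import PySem

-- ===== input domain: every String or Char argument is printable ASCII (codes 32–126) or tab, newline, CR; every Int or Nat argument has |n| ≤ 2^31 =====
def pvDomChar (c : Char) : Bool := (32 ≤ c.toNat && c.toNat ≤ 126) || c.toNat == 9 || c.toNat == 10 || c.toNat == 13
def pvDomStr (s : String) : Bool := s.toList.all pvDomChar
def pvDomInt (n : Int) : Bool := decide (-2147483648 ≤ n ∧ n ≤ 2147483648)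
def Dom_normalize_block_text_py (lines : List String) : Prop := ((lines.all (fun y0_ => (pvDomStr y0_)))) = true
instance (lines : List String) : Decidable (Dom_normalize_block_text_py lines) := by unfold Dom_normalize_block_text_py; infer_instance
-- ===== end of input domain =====

-- B replaces A's two early-stopping boundary while-loops by one enumerate pass collecting
-- non-blank indices and an inclusive slice between the first and last one (alternative, same cost).


-- ===== PORT A =====
-- 'not line.strip()' : a Python str is falsy iff empty, so the loop condition is strip(line) == "".
def pvBlank (s : String) : Bool := PySem.Str.strip s == ""

-- first while loop: advance start while the line is blank (lines[start] read with getD: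
-- the index is in range whenever the loop body runs, since start < e ≤ len lines at every call)
def pvAFwd (lines : List String) (start e : Nat) : Nat :=
  if _h : start < e ∧ pvBlank (lines.getD start "") = true then pvAFwd lines (start + 1) e
  else start
  termination_by e - start
  decreasing_by omega

-- second while loop: retreat end while lines[end-1] is blank
def pvABwd (lines : List String) (start e : Nat) : Nat :=
  if _h : start < e ∧ pvBlank (lines.getD (e - 1) "") = true then pvABwd lines start (e - 1)
  else e
  termination_by e - start
  decreasing_by omega

def normalize_block_text_py (lines : List String) : String :=
  let start := pvAFwd lines 0 lines.length
  let e := pvABwd lines start lines.length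
  PySem.Str.join "\n" (PySem.List.slice lines (some (start : Int)) (some (e : Int)))

-- ===== PORT B =====
-- idxs = [i for i, line in enumerate(lines) if line.strip()]
def pvBIdxs (lines : List String) : List Int :=
  ((PySem.List.enumerate lines 0).filter (fun p => !(pvBlank p.2))).map Prod.fst

def normalize_block_text_py_alt (lines : List String) : String :=
  let idxs := pvBIdxs lines
  if idxs.isEmpty then ""
  else PySem.Str.join "\n"
    (PySem.List.slice lines (some (idxs.headD 0)) (some (idxs.getLastD 0 + 1)))

-- ===== PRECONDITION & SPEC =====
def Spec_normalize_block_text_py (lines : List String) (out : String) : Prop := out = normalize_block_text_py_alt lines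
instance (lines : List String) (out : String) : Decidable (Spec_normalize_block_text_py lines out) := by unfold Spec_normalize_block_text_py; infer_instance

-- ===== CLAIM (what is proved, stated in full; the proofs are below) =====
def Claim_equal_normalize_block_text_py : Prop := ∀ (lines : List String), Dom_normalize_block_text_py lines → Spec_normalize_block_text_py lines (normalize_block_text_py lines)

-- ===== LEMMAS AND PROOFS =====

-- generalized form of pvBIdxs with arbitrary starting index, for induction
def pvIdxsFrom (lines : List String) (s : Int) : List Int :=
  ((PySem.List.enumerate lines s).filter (fun p => !(pvBlank p.2))).map Prod.fst

theorem pvIdxsFrom_nil (s : Int) : pvIdxsFrom [] s = [] := rfl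

theorem pvIdxsFrom_cons (x : String) (xs : List String) (s : Int) :
    pvIdxsFrom (x :: xs) s =
      (if pvBlank x then pvIdxsFrom xs (s + 1) else s :: pvIdxsFrom xs (s + 1)) := by
  simp [pvIdxsFrom, PySem.List.enumerate_cons, List.filter_cons]
  by_cases h : pvBlank x <;> simp [h]

theorem pvBIdxs_eq (lines : List String) : pvBIdxs lines = pvIdxsFrom lines 0 := rfl

theorem pvIdxsFrom_eq_nil_iff (xs : List String) (s : Int) :
    pvIdxsFrom xs s = [] ↔ ∀ a ∈ xs, pvBlank a = true := by
  induction xs generalizing s with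
  | nil => simp [pvIdxsFrom_nil]
  | cons x t ih =>
    rw [pvIdxsFrom_cons]
    by_cases h : pvBlank x <;> simp [h, ih]

theorem pvTakeWhile_append_of_all {α : Type} (p : α → Bool) (l1 l2 : List α)
    (h : ∀ a ∈ l1, p a = true) : (l1 ++ l2).takeWhile p = l1 ++ l2.takeWhile p := by
  induction l1 with
  | nil => simp
  | cons x t ih =>
    simp only [List.cons_append, List.takeWhile_cons, h x (by simp)]
    rw [ih (fun a ha => h a (by simp [ha]))]
    simp

theorem pvTakeWhile_append_of_not_all {α : Type} (p : α → Bool) (l1 l2 : List α)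
    (h : ∃ a ∈ l1, p a = false) : (l1 ++ l2).takeWhile p = l1.takeWhile p := by
  induction l1 with
  | nil => simp at h
  | cons x t ih =>
    by_cases hx : p x
    · simp [List.takeWhile_cons, hx]
      apply ih
      rcases h with ⟨a, ha, hpa⟩
      rcases List.mem_cons.mp ha with ha | ha
      · subst ha; simp [hx] at hpa
      · exact ⟨a, ha, hpa⟩
    · simp [List.takeWhile_cons, Bool.eq_false_iff.mpr hx]

theorem pvTake_reverse_dropWhile {α : Type} (p : α → Bool) (xs : List α) :
    xs.take ((xs.reverse.dropWhile p).length) = (xs.reverse.dropWhile p).reverse := by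
  have h : (xs.reverse.dropWhile p).reverse ++ (xs.reverse.takeWhile p).reverse = xs := by
    rw [← List.reverse_append, List.takeWhile_append_dropWhile, List.reverse_reverse]
  calc xs.take ((xs.reverse.dropWhile p).length)
      = ((xs.reverse.dropWhile p).reverse ++ (xs.reverse.takeWhile p).reverse).take
          ((xs.reverse.dropWhile p).reverse.length) := by rw [List.length_reverse, h]
    _ = (xs.reverse.dropWhile p).reverse := List.take_left

theorem pvAFwd_eq (lines : List String) :
    ∀ (n s : Nat), n = lines.length - s → s ≤ lines.length →
      pvAFwd lines s lines.length = s + ((lines.drop s).takeWhile pvBlank).length := by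
  intro n
  induction n with
  | zero =>
    intro s hn hs
    have : s = lines.length := by omega
    subst this
    rw [pvAFwd]
    simp
  | succ k ih =>
    intro s hn hs
    have hslt : s < lines.length := by omega
    have hget : lines.getD s "" = lines[s] := by
      simp [List.getD_eq_getElem?_getD, List.getElem?_eq_getElem hslt]
    have hdrop : lines.drop s = lines[s] :: lines.drop (s + 1) :=
      List.drop_eq_getElem_cons hslt
    rw [pvAFwd]
    by_cases hb : pvBlank lines[s]
    · rw [dif_pos ⟨hslt, by rw [hget]; exact hb⟩]
      rw [ih (s + 1) (by omega) (by omega)]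
      rw [hdrop, List.takeWhile_cons, hb]
      simp; omega
    · rw [dif_neg (by rw [hget]; tauto)]
      rw [hdrop, List.takeWhile_cons, Bool.eq_false_iff.mpr hb]
      simp

theorem pvABwd_eq (lines : List String) :
    ∀ (n s e : Nat), n = e - s → s ≤ e → e ≤ lines.length →
      pvABwd lines s e = s + (((lines.drop s).take (e - s)).reverse.dropWhile pvBlank).length := by
  intro n
  induction n with
  | zero =>
    intro s e hn hs he
    have : s = e := by omega
    subst this
    rw [pvABwd]
    simp
  | succ k ih =>
    intro s e hn hs he
    have hse : s < e := by omega
    have hlt : e - 1 < lines.length := by omega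
    have hget : lines.getD (e - 1) "" = lines[e - 1] := by
      simp [List.getD_eq_getElem?_getD, List.getElem?_eq_getElem hlt]
    have hseg : (lines.drop s).take (e - s) =
        (lines.drop s).take (e - 1 - s) ++ [lines[e - 1]] := by
      have h1 : e - s = (e - 1 - s) + 1 := by omega
      rw [h1, List.take_succ]
      have h2 : (lines.drop s)[e - 1 - s]? = some lines[e - 1] := by
        rw [List.getElem?_drop]
        have : s + (e - 1 - s) = e - 1 := by omega
        rw [this, List.getElem?_eq_getElem hlt]
      rw [h2]; rfl
    rw [pvABwd]
    by_cases hb : pvBlank lines[e - 1]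
    · rw [dif_pos ⟨hse, by rw [hget]; exact hb⟩]
      rw [ih s (e - 1) (by omega) (by omega) (by omega)]
      rw [hseg, List.reverse_append]
      simp [List.dropWhile_cons, hb]
    · rw [dif_neg (by rw [hget]; tauto)]
      rw [hseg, List.reverse_append]
      simp [List.dropWhile_cons, Bool.eq_false_iff.mpr hb]
      have hlen : ((lines.drop s).take (e - 1 - s)).length = e - 1 - s := by
        simp; omega
      omega

theorem pvHeadD_idxsFrom (xs : List String) :
    ∀ (s : Int), (∃ a ∈ xs, pvBlank a = false) →
      (pvIdxsFrom xs s).headD 0 = s + ((xs.takeWhile pvBlank).length : Int) := by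
  induction xs with
  | nil => intro s h; simp at h
  | cons x t ih =>
    intro s h
    rw [pvIdxsFrom_cons]
    by_cases hx : pvBlank x
    · rw [if_pos hx]
      have ht : ∃ a ∈ t, pvBlank a = false := by
        rcases h with ⟨a, ha, hpa⟩
        rcases List.mem_cons.mp ha with ha | ha
        · subst ha; rw [hx] at hpa; simp at hpa
        · exact ⟨a, ha, hpa⟩
      rw [ih (s + 1) ht, List.takeWhile_cons, hx]
      simp; push_cast; ring
    · rw [if_neg hx]
      rw [List.takeWhile_cons, Bool.eq_false_iff.mpr hx]
      simp

theorem pvGetLastD_idxsFrom (xs : List String) :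
    ∀ (s : Int), (∃ a ∈ xs, pvBlank a = false) →
      (pvIdxsFrom xs s).getLastD 0 =
        s + (xs.length : Int) - 1 - ((xs.reverse.takeWhile pvBlank).length : Int) := by
  induction xs with
  | nil => intro s h; simp at h
  | cons x t ih =>
    intro s h
    rw [pvIdxsFrom_cons]
    by_cases ht : ∃ a ∈ t, pvBlank a = false
    · have hne : pvIdxsFrom t (s + 1) ≠ [] := by
        intro hnil
        rw [pvIdxsFrom_eq_nil_iff] at hnil
        rcases ht with ⟨a, ha, hpa⟩
        rw [hnil a ha] at hpa; simp at hpa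
      have hrec : (pvIdxsFrom t (s + 1)).getLastD 0 =
          (s + 1) + (t.length : Int) - 1 - ((t.reverse.takeWhile pvBlank).length : Int) :=
        ih (s + 1) ht
      have htw : ((x :: t).reverse.takeWhile pvBlank) = (t.reverse.takeWhile pvBlank) := by
        rw [List.reverse_cons]
        apply pvTakeWhile_append_of_not_all
        rcases ht with ⟨a, ha, hpa⟩
        exact ⟨a, by simp [ha], hpa⟩
      have hgoal : ∀ l : List Int, l.getLastD 0 =
          (s + 1) + (t.length : Int) - 1 - ((t.reverse.takeWhile pvBlank).length : Int) →
          l ≠ [] →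
          (if pvBlank x then l else s :: l).getLastD 0 =
            s + ((x :: t).length : Int) - 1 - (((x :: t).reverse.takeWhile pvBlank).length : Int) := by
        intro l hl hlne
        rw [htw]
        by_cases hx : pvBlank x
        · rw [if_pos hx, hl]; simp; push_cast; ring
        · rw [if_neg hx]
          rcases List.exists_cons_of_ne_nil hlne with ⟨y, l', rfl⟩
          rw [show (s :: y :: l').getLastD 0 = (y :: l').getLastD 0 from rfl, hl]
          simp; push_cast; ring
      exact hgoal _ hrec hne
    · -- every line of t is blank, so x must be the non-blank one
      push Not at ht
      have hallt : ∀ a ∈ t, pvBlank a = true := by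
        intro a ha
        have := ht a ha
        revert this; cases pvBlank a <;> simp
      have hx : pvBlank x = false := by
        rcases h with ⟨a, ha, hpa⟩
        rcases List.mem_cons.mp ha with ha | ha
        · subst ha; exact hpa
        · rw [hallt a ha] at hpa; simp at hpa
      have hnil : pvIdxsFrom t (s + 1) = [] := (pvIdxsFrom_eq_nil_iff t (s + 1)).mpr hallt
      rw [if_neg (by simp [hx]), hnil]
      have htw : ((x :: t).reverse.takeWhile pvBlank).length = t.length := by
        rw [List.reverse_cons, pvTakeWhile_append_of_all pvBlank t.reverse [x]
          (by intro a ha; exact hallt a (List.mem_reverse.mp ha))]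
        simp [List.takeWhile_cons, hx]
      rw [htw]
      simp; push_cast; ring

-- ===== VERDICT (by name: the statement is the Claim_ definition above) =====
-- abbreviations for the two trim boundaries, used only by the proofs below
def pvS0 (lines : List String) : Nat := (lines.takeWhile pvBlank).length
def pvLd (lines : List String) : List String := lines.drop (pvS0 lines)
def pvT0 (lines : List String) : Nat := ((pvLd lines).reverse.takeWhile pvBlank).length
def pvM (lines : List String) : Nat := ((pvLd lines).reverse.dropWhile pvBlank).length

theorem pvS0_le (lines : List String) : pvS0 lines ≤ lines.length :=
  (List.takeWhile_prefix pvBlank).length_le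

theorem pvDropWhile_eq_drop {α : Type} (p : α → Bool) (l : List α) :
    l.dropWhile p = l.drop ((l.takeWhile p).length) := by
  induction l with
  | nil => rfl
  | cons x t ih =>
    by_cases hx : p x
    · simp [List.dropWhile_cons, List.takeWhile_cons, hx, ih]
    · simp [List.dropWhile_cons, List.takeWhile_cons, hx]

theorem pvLd_eq_dropWhile (lines : List String) :
    pvLd lines = lines.dropWhile pvBlank := by
  rw [pvLd, pvS0, pvDropWhile_eq_drop]

theorem pvMT (lines : List String) :
    pvT0 lines + pvM lines = lines.length - pvS0 lines := by
  have h := congrArg List.length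
    (List.takeWhile_append_dropWhile (p := pvBlank) (l := (pvLd lines).reverse))
  simp only [List.length_append, List.length_reverse] at h
  have h2 : (pvLd lines).length = lines.length - pvS0 lines := by
    simp [pvLd]
  rw [pvT0, pvM]
  omega

theorem pvA_eq (lines : List String) :
    normalize_block_text_py lines =
      PySem.Str.join "\n" (((pvLd lines).reverse.dropWhile pvBlank).reverse) := by
  have hs0le := pvS0_le lines
  have hstart : pvAFwd lines 0 lines.length = pvS0 lines := by
    simpa [pvS0] using pvAFwd_eq lines lines.length 0 (by omega) (by omega)
  have htake : (pvLd lines).take (lines.length - pvS0 lines) = pvLd lines :=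
    List.take_of_length_le (by simp [pvLd])
  have hend : pvABwd lines (pvS0 lines) lines.length = pvS0 lines + pvM lines := by
    rw [pvABwd_eq lines (lines.length - pvS0 lines) (pvS0 lines) lines.length rfl hs0le
      (le_refl _), ← pvLd, htake, ← pvM]
  simp only [normalize_block_text_py, hstart, hend]
  rw [show ((pvS0 lines + pvM lines : Nat) : Int) =
      ((pvS0 lines : Nat) : Int) + ((pvM lines : Nat) : Int) by push_cast; ring]
  rw [PySem.List.slice_natCast_add, ← pvLd, pvM, pvTake_reverse_dropWhile]

theorem normalize_block_text_py_spec : Claim_equal_normalize_block_text_py := by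
  intro lines _dom
  unfold Spec_normalize_block_text_py
  rw [pvA_eq]
  have hs0le := pvS0_le lines
  have hmt := pvMT lines
  by_cases hex : ∃ a ∈ lines, pvBlank a = false
  · -- at least one non-blank line
    have hexld : ∃ a ∈ (pvLd lines).reverse, pvBlank a = false := by
      rcases hex with ⟨a, ha, hpa⟩
      refine ⟨a, ?_, hpa⟩
      rw [List.mem_reverse, pvLd_eq_dropWhile]
      rcases List.mem_append.mp
        (by rw [List.takeWhile_append_dropWhile]; exact ha :
          a ∈ lines.takeWhile pvBlank ++ lines.dropWhile pvBlank) with hmem | hmem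
      · rw [List.mem_takeWhile_imp hmem] at hpa; simp at hpa
      · exact hmem
    have ht0' : (lines.reverse.takeWhile pvBlank).length = pvT0 lines := by
      have hrev : lines.reverse = (pvLd lines).reverse ++ (lines.takeWhile pvBlank).reverse := by
        conv_lhs => rw [← List.takeWhile_append_dropWhile (p := pvBlank) (l := lines)]
        rw [List.reverse_append, pvLd_eq_dropWhile]
      rw [hrev, pvTakeWhile_append_of_not_all _ _ _ hexld, pvT0]
    have hne : pvBIdxs lines ≠ [] := by
      rw [pvBIdxs_eq]
      intro h0
      rw [pvIdxsFrom_eq_nil_iff] at h0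
      rcases hex with ⟨a, ha, hpa⟩
      rw [h0 a ha] at hpa; simp at hpa
    have hhead : (pvBIdxs lines).headD 0 = ((pvS0 lines : Nat) : Int) := by
      rw [pvBIdxs_eq, pvHeadD_idxsFrom lines 0 hex, pvS0]
      simp
    have hlast : (pvBIdxs lines).getLastD 0 + 1 = ((lines.length - pvT0 lines : Nat) : Int) := by
      rw [pvBIdxs_eq, pvGetLastD_idxsFrom lines 0 hex, ht0']
      have h1 : pvT0 lines ≤ lines.length := by omega
      push_cast [h1]
      ring
    simp only [normalize_block_text_py_alt]
    rw [if_neg (by simpa using hne)]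
    rw [hhead, hlast, PySem.List.slice_natCast, ← pvLd]
    rw [show lines.length - pvT0 lines - pvS0 lines = pvM lines by omega]
    rw [pvM, pvTake_reverse_dropWhile]
  · -- every line is blank: B returns "", and A's trimmed segment is empty
    have hall : ∀ a ∈ lines, pvBlank a = true := by
      intro a ha
      by_contra hcon
      exact hex ⟨a, ha, by revert hcon; cases pvBlank a <;> simp⟩
    have hempty : pvBIdxs lines = [] := by
      rw [pvBIdxs_eq]; exact (pvIdxsFrom_eq_nil_iff _ _).mpr hall
    have hldnil : pvLd lines = [] := by
      rw [pvLd_eq_dropWhile, pvDropWhile_eq_drop,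
        List.takeWhile_eq_self_iff.mpr hall, List.drop_length]
    simp only [normalize_block_text_py_alt]
    rw [if_pos (by simp [hempty])]
    rw [hldnil]
    rfl
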